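-- pv_equiv track=rewrite | github.com/noraelazoui/stock_management | models/schemas.py | normalize_to_schema
-- ===== SOURCE A (Python) =====
-- def get_field_value(obj, *args, **kwargs):
--     """
--     Get field value trying multiple field names (case-insensitive fallback).
--     Tries exact match first, then case-insensitive search.
--
--     Args:
--         obj: Dictionary object to search
--         *args: Field names to try, or a list of field names, optionally followed by default value
--         **kwargs: Optional 'default' keyword argument
--
--     Usage:
--         price = get_field_value(product, Schema.PRICE, "Prix", "price", default=0)
--         # OR
--         price = get_field_value(product, [Schema.PRICE, "Prix"], default=0)
--         # OR
--         price = get_field_value(product, [Schema.PRICE, "Prix"], 0)  # positional default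
--     """
--     # Extract default value (can be positional or keyword)
--     default = kwargs.get('default', None)
--     field_names = args
--
--     # Handle: get_field_value(obj, [list], default)
--     if len(args) >= 2 and isinstance(args[0], (list, tuple)) and not isinstance(args[1], (list, tuple)):
--         field_names = args[0]
--         default = args[1] if len(args) > 1 else default
--     # Handle: get_field_value(obj, [list])
--     elif len(args) == 1 and isinstance(args[0], (list, tuple)):
--         field_names = args[0]
--     # Handle: get_field_value(obj, field1, field2, ...)
--     # field_names is already set to args
--
--     for field_name in field_names:
--         if isinstance(field_name, (list, tuple)):
--             continue  # Skip if somehow a list got in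
--         if field_name in obj:
--             return obj[field_name]
--
--     # Case-insensitive fallback
--     for field_name in field_names:
--         if isinstance(field_name, (list, tuple)):
--             continue
--         field_lower = str(field_name).lower()
--         for key in obj.keys():
--             if str(key).lower() == field_lower:
--                 return obj[key]
--
--     return default
--
-- def normalize_to_schema(obj, schema_mapping):
--     """
--     Normalize object field names to match schema.
--
--     Args:
--         obj: Dictionary to normalize
--         schema_mapping: Dict mapping schema field names to possible old names
--
--     Example:
--         mapping = {
--             ArticleSchema.Product.PRICE: ["Prix", "price", "PRICE"],
--             ArticleSchema.Product.QUANTITY: ["Quantité", "quantite", "QUANTITE"]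
--         }
--         normalized = normalize_to_schema(product, mapping)
--     """
--     normalized = {}
--     for standard_name, possible_names in schema_mapping.items():
--         value = get_field_value(obj, *possible_names)
--         if value is not None:
--             normalized[standard_name] = value
--
--     # Copy any fields not in mapping
--     for key, value in obj.items():
--         if key not in normalized.values() and key not in [name for names in schema_mapping.values() for name in names]:
--             normalized[key] = value
--
--     return normalized
-- ===== SOURCE B (Python) =====
-- def normalize_to_schema(obj, schema_mapping):
--     # Case-insensitive index over obj's keys, built once (first occurrence wins).
--     index = {}
--     for k in obj:
--         lk = str(k).lower()
--         if lk not in index: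
--             index[lk] = k
--     # Flattened possible-name set, built once.
--     flat = {name for names in schema_mapping.values() for name in names}
--
--     normalized = {}
--     for standard_name, names in schema_mapping.items():
--         value = None
--         ci_key = None
--         for name in names:
--             if name in obj:
--                 value = obj[name]
--                 break
--             if ci_key is None:
--                 lk = str(name).lower()
--                 if lk in index:
--                     ci_key = index[lk]
--         else:
--             if ci_key is not None:
--                 value = obj[ci_key]
--         if value is not None:
--             normalized[standard_name] = value
--
--     for key, value in obj.items():
--         if key not in flat and key not in normalized.values():
--             normalized[key] = value
--     return normalized
-- ===== Notes on version B (the rewrite author's own statement) =====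
-- stated objective: faster
-- what changed: B precomputes once a case-insensitive first-occurrence key index and the flattened possible-name set, and replaces A's two sequential passes per mapping entry (exact scan, then a nested rescan of all obj keys per name) and A's per-key re-flattening of all possible names by single lookups.
import Mathlib
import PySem

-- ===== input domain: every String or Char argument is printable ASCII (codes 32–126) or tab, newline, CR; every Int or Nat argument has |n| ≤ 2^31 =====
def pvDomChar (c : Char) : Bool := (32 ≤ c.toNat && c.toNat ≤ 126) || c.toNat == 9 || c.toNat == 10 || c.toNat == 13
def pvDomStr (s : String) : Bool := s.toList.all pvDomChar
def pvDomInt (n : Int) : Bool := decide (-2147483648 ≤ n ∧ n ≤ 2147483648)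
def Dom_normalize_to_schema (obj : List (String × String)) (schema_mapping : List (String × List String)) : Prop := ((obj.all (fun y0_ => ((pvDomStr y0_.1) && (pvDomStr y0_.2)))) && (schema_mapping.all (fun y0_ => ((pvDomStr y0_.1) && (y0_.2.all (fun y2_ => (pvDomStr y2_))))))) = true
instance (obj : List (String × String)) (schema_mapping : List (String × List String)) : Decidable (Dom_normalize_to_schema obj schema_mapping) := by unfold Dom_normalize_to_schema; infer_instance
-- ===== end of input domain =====

-- B builds the case-insensitive key index and the flattened name set once and does one pass
-- per mapping entry instead of A's exact pass followed by a nested rescan of obj's keys (objective: faster).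

-- ===== PORT A =====
-- get_field_value's exact pass: first name present in the dict
def pvExactLoop (d : PySem.Dict String String) : List String → Option String
  | [] => none
  | n :: rest => if d.contains n then d.get? n else pvExactLoop d rest

-- get_field_value's case-insensitive fallback pass: per name, scan obj.keys() for the first lowercase match
def pvCiLoop (d : PySem.Dict String String) : List String → Option String
  | [] => none
  | n :: rest =>
    match (PySem.Dict.keys d).find? (fun k => PySem.Str.lower k == PySem.Str.lower n) with
    | some k => d.get? k
    | none => pvCiLoop d rest

-- get_field_value(obj, *possible_names): all names are strings, so the list/tuple branches never fire
def pvGetFieldValue (d : PySem.Dict String String) (names : List String) : Option String :=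
  match pvExactLoop d names with
  | some v => some v
  | none => pvCiLoop d names

def normalize_to_schema (obj : List (String × String)) (schema_mapping : List (String × List String)) : List (String × String) :=
  let d := PySem.Dict.ofList obj
  let sm := PySem.Dict.ofList schema_mapping
  let normalized : PySem.Dict String String :=
    sm.items.foldl (fun nd p =>
      match pvGetFieldValue d p.2 with
      | some v => nd.insert p.1 v
      | none => nd) PySem.Dict.empty
  let final :=
    d.items.foldl (fun nd p =>
      if ¬ (PySem.Dict.values nd).contains p.1 ∧
         ¬ ((PySem.Dict.values sm).flatMap (fun ns => ns)).contains p.1 then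
        nd.insert p.1 p.2
      else nd) normalized
  final.items

-- ===== PORT B =====
-- B's single pass over the names: break on an exact hit, remember the first case-insensitive candidate key
def pvFindVal (d : PySem.Dict String String) (ix : PySem.Dict String String) :
    List String → Option String → Option String
  | [], ciKey =>
    match ciKey with
    | some k => d.get? k
    | none => none
  | n :: rest, ciKey =>
    if d.contains n then d.get? n
    else
      let ciKey' := if ciKey.isSome then ciKey else ix.get? (PySem.Str.lower n)
      pvFindVal d ix rest ciKey'

def normalize_to_schema_alt (obj : List (String × String)) (schema_mapping : List (String × List String)) : List (String × String) :=
  let d := PySem.Dict.ofList obj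
  let sm := PySem.Dict.ofList schema_mapping
  -- case-insensitive index over obj's keys, first occurrence wins
  let ix : PySem.Dict String String :=
    (PySem.Dict.keys d).foldl (fun ix k =>
      let lk := PySem.Str.lower k
      if ix.contains lk then ix else ix.insert lk k) PySem.Dict.empty
  -- flattened possible-name set, built once
  let flat : PySem.Set String := PySem.Set.ofList ((PySem.Dict.values sm).flatMap (fun ns => ns))
  let normalized : PySem.Dict String String :=
    sm.items.foldl (fun nd p =>
      match pvFindVal d ix p.2 none with
      | some v => nd.insert p.1 v
      | none => nd) PySem.Dict.empty
  let final :=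
    d.items.foldl (fun nd p =>
      if ¬ flat.contains p.1 ∧ ¬ (PySem.Dict.values nd).contains p.1 then
        nd.insert p.1 p.2
      else nd) normalized
  final.items

-- ===== PRECONDITION & SPEC =====
def Spec_normalize_to_schema (obj : List (String × String)) (schema_mapping : List (String × List String)) (out : List (String × String)) : Prop := out = normalize_to_schema_alt obj schema_mapping
instance (obj : List (String × String)) (schema_mapping : List (String × List String)) (out : List (String × String)) : Decidable (Spec_normalize_to_schema obj schema_mapping out) := by unfold Spec_normalize_to_schema; infer_instance

-- ===== CLAIM (what is proved, stated in full; the proofs are below) =====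
def Claim_equal_normalize_to_schema : Prop := ∀ (obj : List (String × String)) (schema_mapping : List (String × List String)), Dom_normalize_to_schema obj schema_mapping → Spec_normalize_to_schema obj schema_mapping (normalize_to_schema obj schema_mapping)

-- ===== LEMMAS AND PROOFS =====

-- the index fold answers exactly the first-match scan of the key list
lemma pv_index_get (ks : List String) (ix0 : PySem.Dict String String) (s : String) :
    (ks.foldl (fun ix k =>
      let lk := PySem.Str.lower k
      if ix.contains lk then ix else ix.insert lk k) ix0).get? s
    = match ix0.get? s with
      | some v => some v
      | none => ks.find? (fun k => PySem.Str.lower k == s) := by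
  induction ks generalizing ix0 with
  | nil =>
    simp only [List.foldl_nil, List.find?_nil]
    cases h : ix0.get? s <;> rfl
  | cons k rest ih =>
    simp only [List.foldl_cons, List.find?_cons]
    cases hc : ix0.contains (PySem.Str.lower k) with
    | true =>
      simp only [if_true]
      rw [ih]
      cases h : ix0.get? s with
      | some v => rfl
      | none =>
        have he : (PySem.Str.lower k == s) = false := by
          rw [beq_eq_false_iff_ne]
          intro heq
          have hs : ix0.contains s = true := heq ▸ hc
          rw [PySem.Dict.contains_eq_isSome_get?, h] at hs
          simp at hs
        simp only [he]
    | false =>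
      simp only [Bool.false_eq_true, if_false]
      rw [ih, PySem.Dict.get?_insert]
      by_cases hsk : s = PySem.Str.lower k
      · have hn : ix0.get? s = none := by
          rw [PySem.Dict.contains_eq_isSome_get?] at hc
          rw [hsk]
          exact Option.not_isSome_iff_eq_none.mp (by simp [hc])
        have he : (PySem.Str.lower k == s) = true := by
          rw [beq_iff_eq]; exact hsk.symm
        rw [hsk] at hn
        simp [hsk, hn]
      · have he : (PySem.Str.lower k == s) = false := by
          rw [beq_eq_false_iff_ne]; exact fun h => hsk h.symm
        simp only [if_neg hsk, he]

-- B's one-pass search equals A's exact pass followed (if it misses) by the fallback pass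
lemma pv_findVal_eq (d ix : PySem.Dict String String)
    (hix : ∀ s, ix.get? s = (PySem.Dict.keys d).find? (fun k => PySem.Str.lower k == s))
    (names : List String) (ck : Option String) :
    pvFindVal d ix names ck
    = match pvExactLoop d names with
      | some v => some v
      | none =>
        match ck with
        | some k => d.get? k
        | none => pvCiLoop d names := by
  induction names generalizing ck with
  | nil => cases ck <;> simp [pvFindVal, pvExactLoop, pvCiLoop]
  | cons n rest ih =>
    simp only [pvFindVal, pvExactLoop, pvCiLoop]
    cases hc : d.contains n with
    | true =>
      simp only [if_true]
      cases h : d.get? n with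
      | some v => simp
      | none =>
        exfalso
        rw [PySem.Dict.contains_eq_isSome_get?, h] at hc
        simp at hc
    | false =>
      simp only [Bool.false_eq_true, if_false]
      cases ck with
      | some k =>
        simp only [Option.isSome_some, if_true]
        rw [ih]
      | none =>
        simp only [Option.isSome_none, Bool.false_eq_true, if_false, hix]
        rw [ih]

-- membership in B's flattened set equals membership in A's recomputed flattened list
lemma pv_flat_contains (l : List String) (x : String) :
    (PySem.Set.ofList l).contains x = l.contains x := by
  simp [PySem.Set.mem_ofList]

-- ===== VERDICT (by name: the statement is the Claim_ definition above) =====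
theorem normalize_to_schema_spec : Claim_equal_normalize_to_schema := by
  intro obj schema_mapping _
  unfold Spec_normalize_to_schema normalize_to_schema normalize_to_schema_alt
  simp only []
  have hix : ∀ s,
      ((PySem.Dict.keys (PySem.Dict.ofList obj)).foldl (fun ix k =>
        let lk := PySem.Str.lower k
        if ix.contains lk then ix else ix.insert lk k) PySem.Dict.empty).get? s
      = (PySem.Dict.keys (PySem.Dict.ofList obj)).find? (fun k => PySem.Str.lower k == s) := by
    intro s
    rw [pv_index_get]
    simp [PySem.Dict.get?_empty]
  have h1 : (fun (nd : PySem.Dict String String) (p : String × List String) =>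
      match pvGetFieldValue (PySem.Dict.ofList obj) p.2 with
      | some v => nd.insert p.1 v
      | none => nd)
    = (fun (nd : PySem.Dict String String) (p : String × List String) =>
      match pvFindVal (PySem.Dict.ofList obj)
        ((PySem.Dict.keys (PySem.Dict.ofList obj)).foldl (fun ix k =>
          let lk := PySem.Str.lower k
          if ix.contains lk then ix else ix.insert lk k) PySem.Dict.empty) p.2 none with
      | some v => nd.insert p.1 v
      | none => nd) := by
    funext nd p
    rw [pv_findVal_eq _ _ hix]
    rfl
  have h2 : (fun (nd : PySem.Dict String String) (p : String × String) =>
      if ¬ (PySem.Dict.values nd).contains p.1 ∧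
         ¬ ((PySem.Dict.values (PySem.Dict.ofList schema_mapping)).flatMap (fun ns => ns)).contains p.1 then
        nd.insert p.1 p.2
      else nd)
    = (fun (nd : PySem.Dict String String) (p : String × String) =>
      if ¬ (PySem.Set.ofList ((PySem.Dict.values (PySem.Dict.ofList schema_mapping)).flatMap (fun ns => ns))).contains p.1 ∧
         ¬ (PySem.Dict.values nd).contains p.1 then
        nd.insert p.1 p.2
      else nd) := by
    funext nd p
    rw [pv_flat_contains]
    exact if_congr (by tauto) rfl rfl
  rw [h1, h2]
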